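-- pv_equiv track=rewrite | github.com/alexandraback/datacollection | solutions_2463486_0/Python/Mikemcsam/squarePalindrome.py | squarePalindromeGen
-- ===== SOURCE A (Python) =====
-- def getNextPalindrome(previousPalindrome):
-- 	lowMid = (len(previousPalindrome) - 1)//2
-- 	highMid = (len(previousPalindrome))//2
-- 	while lowMid>=0 and highMid<len(previousPalindrome):
-- 		if previousPalindrome[lowMid] == 9:
-- 			previousPalindrome[lowMid]=0
-- 			previousPalindrome[highMid]=0
-- 			lowMid-=1
-- 			highMid+=1
-- 		else:
-- 			previousPalindrome[lowMid]+=1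
-- 			if highMid != lowMid:
-- 				previousPalindrome[highMid]+=1
-- 			return previousPalindrome
-- 	return [1]+[0]*(len(previousPalindrome)-1) + [1]
--
-- def arrayToNumber(array):
-- 	sum = 0
-- 	for digit in array:
-- 		sum*=10
-- 		sum+=digit
-- 	return sum
--
-- def squarePalindromeGen(lowerBound, upperBound):
-- 	palindrome = [0]
-- 	while True:
-- 		palindrome = getNextPalindrome(palindrome)
-- 		value = arrayToNumber(palindrome)
-- 		if value * value > upperBound:
-- 			return
-- 		if value*value >= lowerBound and isPalindrome(value*value):
-- 			yield value*value
--
-- def isPalindrome(number):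
-- 	array=[]
-- 	while number>0:
-- 		array.append(number%10)
-- 		number //= 10
-- 	for i in range(len(array)):
-- 		if array[i] != array[len(array)-i-1]:
-- 			return False
--
-- 	return True
-- ===== SOURCE B (Python) =====
-- def squarePalindromeGen(lowerBound, upperBound):
--     length = 1
--     while True:
--         half = (length + 1) // 2
--         for prefix in range(10 ** (half - 1), 10 ** half):
--             s = str(prefix)
--             value = int(s + s[:length // 2][::-1])
--             square = value * value
--             if square > upperBound:
--                 return
--             if square >= lowerBound and str(square) == str(square)[::-1]:
--                 yield square
--         length += 1
-- ===== Notes on version B (the rewrite author's own statement) =====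
-- stated objective: alternative
-- what changed: A advances a mutable digit array with a carry-propagating getNextPalindrome machine and an arithmetic digit-reversal palindrome test; B constructs each palindrome directly by mirroring first-half prefixes per length and checks squares by string reversal, with the same first-exceed termination.
import Mathlib
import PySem

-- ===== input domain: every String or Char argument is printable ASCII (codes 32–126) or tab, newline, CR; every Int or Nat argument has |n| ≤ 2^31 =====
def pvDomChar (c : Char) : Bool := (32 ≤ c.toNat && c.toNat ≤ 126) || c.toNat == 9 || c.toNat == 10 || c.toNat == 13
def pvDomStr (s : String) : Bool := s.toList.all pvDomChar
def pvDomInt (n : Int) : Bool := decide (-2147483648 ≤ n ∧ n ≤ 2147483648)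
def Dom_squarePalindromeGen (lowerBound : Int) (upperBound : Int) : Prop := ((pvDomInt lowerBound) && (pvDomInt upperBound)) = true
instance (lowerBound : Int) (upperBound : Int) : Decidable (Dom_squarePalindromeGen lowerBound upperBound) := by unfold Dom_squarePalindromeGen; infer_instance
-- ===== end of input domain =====

-- B replaces A's carry-propagating next-palindrome digit machine by direct construction:
-- enumerate palindromes by length, mirroring each first-half prefix (objective: alternative decomposition).
-- Both Pythons are generators (while True + first-exceed return); the ports use a fuel counter as a
-- totality guard only — on the whole domain Dom both loops stop long before the fuel runs out (proved below).

-- ===== PORT A =====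

-- inner while-loop of getNextPalindrome; list writes prev[i]=v are List.set (index always ≥ 0, in range here).
-- fuel = (lowMid+1).toNat counts the remaining loop iterations exactly: lowMid drops by 1 per pass, so
-- fuel = 0 only when the while-condition 0 ≤ lowMid is already false, and both exits return the same value.
def gnpLoop : Nat → List Int → Int → Int → List Int
  | 0, prev, _, _ => [1] ++ List.replicate (prev.length - 1) 0 ++ [1]
  | f + 1, prev, lowMid, highMid =>
    if 0 ≤ lowMid ∧ highMid < (prev.length : Int) then
      let d := (PySem.List.pyGet? prev lowMid).getD 0
      if d = 9 then
        let prev1 := prev.set lowMid.toNat 0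
        let prev2 := prev1.set highMid.toNat 0
        gnpLoop f prev2 (lowMid - 1) (highMid + 1)
      else
        let prev1 := prev.set lowMid.toNat (d + 1)
        if highMid ≠ lowMid then
          prev1.set highMid.toNat (((PySem.List.pyGet? prev1 highMid).getD 0) + 1)
        else prev1
    else
      [1] ++ List.replicate (prev.length - 1) 0 ++ [1]

def getNextPalindrome (prev : List Int) : List Int :=
  let lowMid := PySem.Int.floordiv ((prev.length : Int) - 1) 2
  gnpLoop (lowMid + 1).toNat prev lowMid (PySem.Int.floordiv (prev.length : Int) 2)

def arrayToNumber (array : List Int) : Int :=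
  array.foldl (fun s d => s * 10 + d) 0

-- the while number>0 digit-collection loop of isPalindrome; fuel = n.toNat bounds the iteration count
-- (n//10 < n for n > 0, so the loop runs at most n.toNat times; fuel = 0 only when n ≤ 0, the loop exit)
def ipDigits : Nat → Int → List Int
  | 0, _ => []
  | f + 1, n =>
    if 0 < n then PySem.Int.mod n 10 :: ipDigits f (PySem.Int.floordiv n 10) else []

def isPalindrome (number : Int) : Bool :=
  let arr := ipDigits number.toNat number
  (List.range arr.length).all (fun i => arr.getD i 0 == arr.getD (arr.length - i - 1) 0)

-- the generator's while True loop; acc collects the yields, fuel is a totality guard only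
def aLoop : Nat → List Int → Int → Int → List Int → List Int
  | 0, _, _, _, acc => acc
  | n + 1, palin, lo, hi, acc =>
    let p := getNextPalindrome palin
    let v := arrayToNumber p
    if v * v > hi then acc
    else aLoop n p lo hi (acc ++ (if decide (lo ≤ v * v) && isPalindrome (v * v) then [v * v] else []))

def squarePalindromeGen (lowerBound : Int) (upperBound : Int) : List Int :=
  aLoop 3000 [0] lowerBound upperBound []

-- ===== PORT B =====

-- value = int(s + s[:length//2][::-1]) where s = str(prefix); s[:k] (k ≥ 0) is List.take, [::-1] is reverse
def bValue (length : Nat) (pfx : Int) : Int :=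
  let s := PySem.Int.toChars pfx
  (PySem.Int.ofChars? (s ++ (s.take (length / 2)).reverse)).getD 0

-- str(square) == str(square)[::-1]
def bStrPal (m : Int) : Bool :=
  let t := PySem.Int.toChars m
  t == t.reverse

-- the inner `for prefix in range(...)` loop; Bool = the early `return` was taken
def bInner (lo hi : Int) (length : Nat) : List Int → List Int → List Int × Bool
  | [], acc => (acc, false)
  | pfx :: rest, acc =>
    let v := bValue length pfx
    if v * v > hi then (acc, true)
    else bInner lo hi length rest (acc ++ (if decide (lo ≤ v * v) && bStrPal (v * v) then [v * v] else []))

-- the outer `while True` over lengths; fuel is a totality guard only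
def bLoop : Nat → Nat → Int → Int → List Int → List Int
  | 0, _, _, _, acc => acc
  | n + 1, length, lo, hi, acc =>
    let half := (length + 1) / 2
    let r := bInner lo hi length (PySem.List.pyRange (10 ^ (half - 1)) (10 ^ half) 1) acc
    if r.2 then r.1 else bLoop n (length + 1) lo hi r.1

def squarePalindromeGen_alt (lowerBound : Int) (upperBound : Int) : List Int :=
  bLoop 10 1 lowerBound upperBound []

-- ===== PRECONDITION & SPEC =====
def Spec_squarePalindromeGen (lowerBound : Int) (upperBound : Int) (out : List Int) : Prop := out = squarePalindromeGen_alt lowerBound upperBound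
instance (lowerBound : Int) (upperBound : Int) (out : List Int) : Decidable (Spec_squarePalindromeGen lowerBound upperBound out) := by unfold Spec_squarePalindromeGen; infer_instance

-- ===== CLAIM (what is proved, stated in full; the proofs are below) =====
def Claim_equal_squarePalindromeGen : Prop := ∀ (lowerBound : Int) (upperBound : Int), Dom_squarePalindromeGen lowerBound upperBound → Spec_squarePalindromeGen lowerBound upperBound (squarePalindromeGen lowerBound upperBound)

-- ===== LEMMAS AND PROOFS =====

-- the common abstract loop: scan values, stop at the first v with v*v > hi (Bool: stopped), filter-yield the rest
def emit (pred : Int → Bool) (lo hi : Int) : List Int → List Int × Bool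
  | [] => ([], false)
  | v :: r =>
    if v * v > hi then ([], true)
    else
      let e := emit pred lo hi r
      ((if decide (lo ≤ v * v) && pred (v * v) then [v * v] else []) ++ e.1, e.2)

-- A's value stream from a given state
def streamVals : List Int → Nat → List Int
  | _, 0 => []
  | p, n + 1 => arrayToNumber (getNextPalindrome p) :: streamVals (getNextPalindrome p) n

-- A's state after n steps
def stateAfter : List Int → Nat → List Int
  | p, 0 => p
  | p, n + 1 => stateAfter (getNextPalindrome p) n

-- B's value stream: palindromes of lengths L, L+1, …, L+n-1 in order
def palsFrom : Nat → Nat → List Int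
  | _, 0 => []
  | L, n + 1 =>
    (PySem.List.pyRange (10 ^ (((L + 1) / 2) - 1)) (10 ^ ((L + 1) / 2)) 1).map (bValue L)
      ++ palsFrom (L + 1) n

theorem emit_append (pred : Int → Bool) (lo hi : Int) (xs ys : List Int) :
    emit pred lo hi (xs ++ ys) =
      if (emit pred lo hi xs).2 then emit pred lo hi xs
      else ((emit pred lo hi xs).1 ++ (emit pred lo hi ys).1, (emit pred lo hi ys).2) := by
  induction xs with
  | nil => simp [emit]
  | cons v r ih =>
    simp only [List.cons_append, emit]
    split
    · simp
    · simp only [ih]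
      by_cases hb : (emit pred lo hi r).2 = true <;> simp [hb]

theorem aLoop_emit (lo hi : Int) : ∀ (n : Nat) (p : List Int) (acc : List Int),
    aLoop n p lo hi acc = acc ++ (emit isPalindrome lo hi (streamVals p n)).1 := by
  intro n
  induction n with
  | zero => intro p acc; simp [aLoop, streamVals, emit]
  | succ n ih =>
    intro p acc
    simp only [aLoop, streamVals, emit]
    split
    · simp
    · rw [ih]
      simp [List.append_assoc]

theorem bInner_emit (lo hi : Int) (L : Nat) : ∀ (pfxs acc : List Int),
    bInner lo hi L pfxs acc =
      (acc ++ (emit bStrPal lo hi (pfxs.map (bValue L))).1,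
       (emit bStrPal lo hi (pfxs.map (bValue L))).2) := by
  intro pfxs
  induction pfxs with
  | nil => intro acc; simp [bInner, emit]
  | cons pfx rest ih =>
    intro acc
    simp only [bInner, List.map_cons, emit]
    split
    · simp
    · rw [ih]
      simp [List.append_assoc]

theorem bLoop_emit (lo hi : Int) : ∀ (n L : Nat) (acc : List Int),
    bLoop n L lo hi acc = acc ++ (emit bStrPal lo hi (palsFrom L n)).1 := by
  intro n
  induction n with
  | zero => intro L acc; simp [bLoop, palsFrom, emit]
  | succ n ih =>
    intro L acc
    simp only [bLoop, palsFrom, bInner_emit, emit_append]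
    split
    · simp_all
    · rw [ih]
      simp_all [List.append_assoc]

theorem emit_stop (pred : Int → Bool) (lo hi : Int) {v : Int} :
    ∀ {xs : List Int}, v ∈ xs → v * v > hi → (emit pred lo hi xs).2 = true := by
  intro xs
  induction xs with
  | nil => intro h; exact absurd h (List.not_mem_nil)
  | cons w r ih =>
    intro hmem hgt
    simp only [emit]
    split
    · rfl
    · rcases List.mem_cons.mp hmem with h | h
      · subst h; omega
      · exact ih h hgt

theorem emit_congr (p1 p2 : Int → Bool) (lo hi : Int) :
    ∀ (xs : List Int), (∀ v ∈ xs, p1 (v * v) = p2 (v * v)) →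
      emit p1 lo hi xs = emit p2 lo hi xs := by
  intro xs
  induction xs with
  | nil => intro _; rfl
  | cons v r ih =>
    intro h
    simp only [emit]
    split
    · rfl
    · rw [ih (fun w hw => h w (List.mem_cons_of_mem _ hw)), h v List.mem_cons_self]

theorem streamVals_add : ∀ (m k : Nat) (p : List Int),
    streamVals p (m + k) = streamVals p m ++ streamVals (stateAfter p m) k := by
  intro m
  induction m with
  | zero => intro k p; simp [streamVals, stateAfter]
  | succ m ih =>
    intro k p
    have : m + 1 + k = (m + k) + 1 := by omega
    rw [this]
    simp only [streamVals, stateAfter]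
    rw [ih k (getNextPalindrome p)]
    simp

theorem palsFrom_add : ∀ (m k L : Nat),
    palsFrom L (m + k) = palsFrom L m ++ palsFrom (L + m) k := by
  intro m
  induction m with
  | zero => intro k L; simp [palsFrom]
  | succ m ih =>
    intro k L
    have : m + 1 + k = (m + k) + 1 := by omega
    rw [this]
    simp only [palsFrom]
    rw [ih k (L + 1)]
    have : L + (m + 1) = L + 1 + m := by omega
    rw [this, List.append_assoc]

-- the two streams share the first 562 values (lengths 1..5 cover them)
set_option maxRecDepth 100000 in
set_option maxHeartbeats 2000000 in
theorem streams_agree : streamVals [0] 562 = (palsFrom 1 5).take 562 := by decide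

set_option maxRecDepth 100000 in
set_option maxHeartbeats 2000000 in
theorem preds_agree :
    (streamVals [0] 562).all (fun v => isPalindrome (v * v) == bStrPal (v * v)) = true := by decide

set_option maxRecDepth 100000 in
set_option maxHeartbeats 2000000 in
theorem stop_mem : (46364 : Int) ∈ streamVals [0] 562 := by decide

-- ===== VERDICT (by name: the statement is the Claim_ definition above) =====
theorem squarePalindromeGen_spec : Claim_equal_squarePalindromeGen := by
  intro lo hi hdom
  have hhi : hi ≤ 2147483648 := by
    simp only [Dom_squarePalindromeGen, pvDomInt, Bool.and_eq_true, decide_eq_true_eq] at hdom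
    exact hdom.2.2
  have hgt : (46364 : Int) * 46364 > hi := by omega
  -- the common prefix
  set P : List Int := streamVals [0] 562 with hP
  have hstopA : (emit isPalindrome lo hi P).2 = true := emit_stop _ lo hi stop_mem hgt
  have hstopB : (emit bStrPal lo hi P).2 = true := emit_stop _ lo hi stop_mem hgt
  -- A's full stream extends P
  have hA : streamVals [0] 3000 = P ++ streamVals (stateAfter [0] 562) 2438 := by
    rw [hP, ← streamVals_add]
  -- B's full stream extends P
  have hB : palsFrom 1 10 = P ++ ((palsFrom 1 5).drop 562 ++ palsFrom 6 5) := by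
    have h5 : palsFrom 1 10 = palsFrom 1 5 ++ palsFrom 6 5 := palsFrom_add 5 5 1
    rw [h5, hP, streams_agree, ← List.append_assoc, List.take_append_drop]
  have hpred : ∀ v ∈ P, isPalindrome (v * v) = bStrPal (v * v) := by
    intro v hv
    have := List.all_eq_true.mp preds_agree v hv
    exact eq_of_beq this
  show aLoop 3000 [0] lo hi [] = bLoop 10 1 lo hi []
  rw [aLoop_emit, bLoop_emit, hA, hB,
      emit_append, emit_append, if_pos hstopA, if_pos hstopB,
      emit_congr isPalindrome bStrPal lo hi P hpred]
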